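-- pv_equiv track=rewrite | github.com/vadim-zyamalov/advent-of-code | year2023/day-13/part2.py | reflection
-- ===== SOURCE A (Python) =====
-- def check(row: str, idx: int, N: int) -> int:
--     if idx < (N // 2):
--         lb, ub = 0, idx * 2 + 1
--     else:
--         lb, ub = (idx + 1) - (N - (idx + 1)), N - 1
--
--     return sum(1 for el1, el2 in zip(row[lb : idx + 1], row[ub:idx:-1]) if el1 != el2)
--
-- def reflection(matrix: list[str]) -> tuple[list[int], ...]:
--     N = len(matrix[0])
--
--     result_eq = []
--     result_sm = []
--
--     for i in range(0, N - 1):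
--         smudges = sum(check(row, i, N) for row in matrix)
--         if smudges == 0:
--             result_eq.append(i + 1)
--         if smudges == 1:
--             result_sm.append(i + 1)
--
--     return result_eq, result_sm
-- ===== SOURCE B (Python) =====
-- def reflection(matrix: list[str]) -> tuple[list[int], ...]:
--     N = len(matrix[0])
--
--     result_eq = []
--     result_sm = []
--
--     if N < 2:
--         return result_eq, result_sm
--
--     # column-major view: one string per column
--     cols = [''.join(row[j] for row in matrix) for j in range(N)]
--     # pairwise column-difference table, computed once
--     D = [[sum(c1 != c2 for c1, c2 in zip(ca, cb)) for cb in cols] for ca in cols]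
--
--     for i in range(N - 1):
--         w = min(i + 1, N - 1 - i)
--         total = sum(D[i - k][i + 1 + k] for k in range(w))
--         if total == 0:
--             result_eq.append(i + 1)
--         elif total == 1:
--             result_sm.append(i + 1)
--
--     return result_eq, result_sm
-- ===== Notes on version B (the rewrite author's own statement) =====
-- stated objective: alternative
-- what changed: A scans row-major, building two mirror slices per row for every axis and summing their mismatches; B restructures the data column-major: it transposes the grid into column strings once, precomputes the full pairwise column-difference table, and then scores every axis by pure table lookups with no per-row work.
-- outside the precondition, e.g. on reflection([]): A raises IndexError, B raises IndexError; on reflection(['ab', 'a']): A returns ([], [1]), B raises IndexError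
import Mathlib
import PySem

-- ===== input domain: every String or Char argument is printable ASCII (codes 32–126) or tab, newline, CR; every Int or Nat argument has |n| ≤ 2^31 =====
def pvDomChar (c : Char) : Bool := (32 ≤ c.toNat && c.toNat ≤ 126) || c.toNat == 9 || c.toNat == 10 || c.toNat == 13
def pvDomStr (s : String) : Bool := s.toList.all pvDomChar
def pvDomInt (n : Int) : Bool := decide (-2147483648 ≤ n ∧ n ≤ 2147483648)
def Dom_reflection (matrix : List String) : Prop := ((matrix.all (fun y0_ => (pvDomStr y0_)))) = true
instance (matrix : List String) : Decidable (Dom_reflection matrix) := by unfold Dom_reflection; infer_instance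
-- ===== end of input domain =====

-- B replaces A's row-major per-axis slice/zip scans by a column-major restructuring: it
-- transposes the grid into column strings once, precomputes the pairwise column-difference
-- table, and scores each axis by pure table lookups (objective: alternative; same asymptotic cost).

-- ===== PORT A =====
-- check(row, idx, N): mismatches between the two mirror slices around the axis after idx
def pvCheck (row : List Char) (idx N : Int) : Int :=
  let lbub := if idx < PySem.Int.floordiv N 2 then ((0 : Int), idx * 2 + 1)
              else ((idx + 1) - (N - (idx + 1)), N - 1)
  let left := PySem.List.slice row (some lbub.1) (some (idx + 1))
  let right := (PySem.List.slice? row (some lbub.2) (some idx) (-1)).getD []   -- step -1 ≠ 0: never none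
  ((left.zip right).map (fun e => if e.1 ≠ e.2 then (1 : Int) else 0)).sum

def reflection (matrix : List String) : List Int × List Int :=
  let N : Int := PySem.Str.len ((PySem.List.pyGet? matrix 0).getD "")   -- matrix[0]: IndexError on [] — excluded by Pre_
  (PySem.List.pyRange 0 (N - 1) 1).foldl
    (fun acc i =>
      let smudges := (matrix.map (fun row => pvCheck row.toList i N)).sum
      let acc1 := if smudges = 0 then (acc.1 ++ [i + 1], acc.2) else acc
      if smudges = 1 then (acc1.1, acc1.2 ++ [i + 1]) else acc1)
    ([], [])

-- ===== PORT B =====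
-- row[j] inside the transpose: inside Pre_ every j < len(row), so getD is exact
-- (Python raises IndexError on a too-short row — excluded by Pre_)
def reflection_alt (matrix : List String) : List Int × List Int :=
  let N : Int := PySem.Str.len ((PySem.List.pyGet? matrix 0).getD "")   -- matrix[0]: IndexError on [] — excluded by Pre_
  if N < 2 then ([], [])
  else
    let cols : List (List Char) :=
      (List.range N.toNat).map (fun j => matrix.map (fun row => row.toList.getD j ' '))
    let D : List (List Int) :=
      cols.map (fun ca => cols.map (fun cb =>
        ((ca.zip cb).map (fun e => if e.1 ≠ e.2 then (1 : Int) else 0)).sum))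
    (PySem.List.pyRange 0 (N - 1) 1).foldl
      (fun acc i =>
        let w := min (i + 1) (N - 1 - i)
        -- D[i-k][i+1+k]: both indices are provably in [0, N) here, so getD is exact
        let total := ((PySem.List.pyRange 0 w 1).map
          (fun k => (D.getD (i - k).toNat []).getD (i + 1 + k).toNat 0)).sum
        if total = 0 then (acc.1 ++ [i + 1], acc.2)
        else if total = 1 then (acc.1, acc.2 ++ [i + 1]) else acc)
      ([], [])

-- ===== PRECONDITION & SPEC =====
-- Pre_ excludes the empty matrix (A raises IndexError on matrix[0]) and, when the first row has
-- length ≥ 2, matrices with a row shorter than the first row: there A's clamped slices silently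
-- zip misaligned characters while B's column transpose raises IndexError.
def Pre_reflection (matrix : List String) : Prop :=
  matrix ≠ [] ∧
  (2 ≤ PySem.Str.len (matrix.headD "") →
    ∀ s ∈ matrix, PySem.Str.len (matrix.headD "") ≤ PySem.Str.len s)
instance (matrix : List String) : Decidable (Pre_reflection matrix) := by
  unfold Pre_reflection; infer_instance
def pvWitness_reflection : List String := ["#.##.", "#.##.", "..##."]
def Spec_reflection (matrix : List String) (out : List Int × List Int) : Prop := out = reflection_alt matrix
instance (matrix : List String) (out : List Int × List Int) : Decidable (Spec_reflection matrix out) := by unfold Spec_reflection; infer_instance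

-- ===== CLAIM (what is proved, stated in full; the proofs are below) =====
def Claim_equal_reflection : Prop := ∀ (matrix : List String), Dom_reflection matrix → Pre_reflection matrix → Spec_reflection matrix (reflection matrix)

-- ===== LEMMAS AND PROOFS =====

-- list-sum over range as a Finset sum (definitional)
lemma pvSumRange (n : ℕ) (f : ℕ → ℤ) : ((List.range n).map f).sum = ∑ j ∈ Finset.range n, f j := rfl

-- filterMap that always hits is a map
lemma pvFilterMapSome {α β : Type} (l : List α) (f : α → Option β) (g : α → β)
    (h : ∀ a ∈ l, f a = some (g a)) : l.filterMap f = l.map g := by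
  induction l with
  | nil => simp
  | cons x xs ih =>
    simp [h x (by simp), ih (fun a ha => h a (by simp [ha]))]

-- a drop/take window of s, written as a map over positions
lemma pvDropTake (s : List Char) (a m : ℕ) (h : a + m ≤ s.length) :
    (s.drop a).take m = (List.range m).map (fun j => s.getD (a + j) ' ') := by
  apply List.ext_getElem
  · simp; omega
  · intro j h1 h2
    have hj : j < m := by simpa using h2
    have haj : a + j < s.length := by omega
    simp [List.getElem_take, List.getElem_drop, haj]

-- the Python slice s[u:v:-1] for 0 ≤ v < u < len s, as a map over positions
lemma pvSliceNeg (s : List Char) (u v : ℕ) (hu : u < s.length) (hv : v < u) :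
    (PySem.List.slice? s (some (u : ℤ)) (some (v : ℤ)) (-1)).getD [] =
      (List.range (u - v)).map (fun j => s.getD (u - j) ' ') := by
  have h1 : ¬ ((u : ℤ) < 0) := by omega
  have h2 : ¬ ((v : ℤ) < 0) := by omega
  have e1 : min ((u : ℤ)) ((s.length : ℤ) - 1) = (u : ℤ) := by omega
  have e2 : min ((v : ℤ)) ((s.length : ℤ) - 1) = (v : ℤ) := by omega
  have hstart : PySem.List.sliceIndices s.length (some (u : ℤ)) (some (v : ℤ)) (-1)
      = ((u : ℤ), (v : ℤ), -1) := by
    unfold PySem.List.sliceIndices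
    simp only [if_pos (show (-1 : ℤ) < 0 by norm_num), h1, h2, if_false, e1, e2]
  unfold PySem.List.slice?
  rw [if_neg (by norm_num), hstart]
  simp only [if_neg (show ¬ ((0 : ℤ) < -1) by norm_num),
    if_pos (show (v : ℤ) < (u : ℤ) by exact_mod_cast hv)]
  have hcnt : (((u : ℤ) - (v : ℤ) + - -1 - 1) / - -1).toNat = u - v := by
    have : (((u : ℤ) - (v : ℤ) + - -1 - 1) / - -1) = (u : ℤ) - (v : ℤ) := by norm_num
    rw [this]; omega
  rw [hcnt, Option.getD_some]
  apply pvFilterMapSome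
  intro k hk
  rw [List.mem_range] at hk
  have hidx : ((u : ℤ) + -1 * (k : ℤ)).toNat = u - k := by omega
  rw [hidx, List.getElem?_eq_getElem (by omega : u - k < s.length),
    List.getD_eq_getElem s ' ' (by omega : u - k < s.length)]

-- A's check equals the centered mismatch count around axis iN
lemma pvCheck_eq (s : List Char) (iN NN : ℕ) (h1 : iN + 1 < NN) (h2 : NN ≤ s.length) :
    pvCheck s (iN : ℤ) (NN : ℤ) =
      ((List.range (min (iN + 1) (NN - 1 - iN))).map
        (fun k => if s.getD (iN - k) ' ' ≠ s.getD (iN + 1 + k) ' ' then (1 : ℤ) else 0)).sum := by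
  have hd2 : PySem.Int.floordiv (NN : ℤ) 2 = ((NN / 2 : ℕ) : ℤ) := by
    exact_mod_cast PySem.Int.floordiv_natCast NN 2
  unfold pvCheck
  by_cases hc : (iN : ℤ) < PySem.Int.floordiv (NN : ℤ) 2
  · have hcc : iN < NN / 2 := by rw [hd2] at hc; exact_mod_cast hc
    have h2i : 2 * iN + 2 ≤ NN := by omega
    rw [if_pos hc]
    dsimp only
    have hl : PySem.List.slice s (some (0 : ℤ)) (some ((iN : ℤ) + 1))
        = (List.range (iN + 1)).map (fun j => s.getD (0 + j) ' ') := by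
      rw [show ((iN : ℤ) + 1) = ((iN + 1 : ℕ) : ℤ) by push_cast; ring]
      rw [PySem.List.slice_zero_start, PySem.List.slice_to_natCast]
      rw [show s.take (iN + 1) = (s.drop 0).take (iN + 1) by simp]
      exact pvDropTake s 0 (iN + 1) (by omega)
    have hr : (PySem.List.slice? s (some ((iN : ℤ) * 2 + 1)) (some (iN : ℤ)) (-1)).getD []
        = (List.range (iN + 1)).map (fun j => s.getD (2 * iN + 1 - j) ' ') := by
      rw [show ((iN : ℤ) * 2 + 1) = ((2 * iN + 1 : ℕ) : ℤ) by push_cast; ring]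
      rw [pvSliceNeg s (2 * iN + 1) iN (by omega) (by omega)]
      rw [show 2 * iN + 1 - iN = iN + 1 from by omega]
    rw [hl, hr, List.zip_map', List.map_map]
    have hmin : min (iN + 1) (NN - 1 - iN) = iN + 1 := by omega
    rw [hmin, pvSumRange, pvSumRange]
    conv_rhs => rw [← Finset.sum_range_reflect]
    apply Finset.sum_congr rfl
    intro j hj
    rw [Finset.mem_range] at hj
    simp only [Function.comp]
    have e1 : iN - (iN + 1 - 1 - j) = 0 + j := by omega
    have e2 : iN + 1 + (iN + 1 - 1 - j) = 2 * iN + 1 - j := by omega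
    rw [e1, e2]
  · have hcc : NN / 2 ≤ iN := by
      rw [hd2] at hc
      have := not_lt.mp hc
      exact_mod_cast this
    have h2i : NN ≤ 2 * iN + 2 := by omega
    rw [if_neg hc]
    dsimp only
    have hlb : ((iN : ℤ) + 1) - ((NN : ℤ) - ((iN : ℤ) + 1)) = ((2 * iN + 2 - NN : ℕ) : ℤ) := by
      omega
    have hl : PySem.List.slice s (some (((iN : ℤ) + 1) - ((NN : ℤ) - ((iN : ℤ) + 1)))) (some ((iN : ℤ) + 1))
        = (List.range (NN - 1 - iN)).map (fun j => s.getD ((2 * iN + 2 - NN) + j) ' ') := by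
      rw [hlb, show ((iN : ℤ) + 1) = ((iN + 1 : ℕ) : ℤ) by push_cast; ring]
      rw [PySem.List.slice_natCast]
      rw [show iN + 1 - (2 * iN + 2 - NN) = NN - 1 - iN by omega]
      exact pvDropTake s (2 * iN + 2 - NN) (NN - 1 - iN) (by omega)
    have hr : (PySem.List.slice? s (some ((NN : ℤ) - 1)) (some (iN : ℤ)) (-1)).getD []
        = (List.range (NN - 1 - iN)).map (fun j => s.getD (NN - 1 - j) ' ') := by
      rw [show ((NN : ℤ) - 1) = ((NN - 1 : ℕ) : ℤ) by omega]
      rw [pvSliceNeg s (NN - 1) iN (by omega) (by omega)]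
    rw [hl, hr, List.zip_map', List.map_map]
    have hmin : min (iN + 1) (NN - 1 - iN) = NN - 1 - iN := by omega
    rw [hmin, pvSumRange, pvSumRange]
    conv_rhs => rw [← Finset.sum_range_reflect]
    apply Finset.sum_congr rfl
    intro j hj
    rw [Finset.mem_range] at hj
    simp only [Function.comp]
    have e1 : iN - (NN - 1 - iN - 1 - j) = (2 * iN + 2 - NN) + j := by omega
    have e2 : iN + 1 + (NN - 1 - iN - 1 - j) = NN - 1 - j := by omega
    rw [e1, e2]

-- sum of a pointwise sum of maps splits
lemma pvSumMapAdd {α : Type} (l : List α) (f g : α → ℤ) :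
    (l.map (fun x => f x + g x)).sum = (l.map f).sum + (l.map g).sum := by
  induction l with
  | nil => simp
  | cons x xs ih => simp [ih]; ring

-- exchange of a row-major double sum into a column-major one
lemma pvSumSwap {α : Type} (l : List α) (w : ℕ) (g : α → ℕ → ℤ) :
    (l.map (fun r => ((List.range w).map (g r)).sum)).sum
      = ((List.range w).map (fun k => (l.map (fun r => g r k)).sum)).sum := by
  induction l with
  | nil => simp
  | cons r rs ih =>
    simp only [List.map_cons, List.sum_cons, ih]
    rw [← pvSumMapAdd]

-- the (a,b) entry of B's table, for in-range a b, is the column-difference sum over the rows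
lemma pvTableEntry (matrix : List String) (Nn a b : ℕ) (ha : a < Nn) (hb : b < Nn) :
    ((((List.range Nn).map (fun j => matrix.map (fun row => row.toList.getD j ' '))).map
        (fun ca => ((List.range Nn).map (fun j => matrix.map (fun row => row.toList.getD j ' '))).map
          (fun cb => ((ca.zip cb).map (fun e => if e.1 ≠ e.2 then (1 : ℤ) else 0)).sum))).getD a []).getD b 0
      = (matrix.map (fun row =>
          if row.toList.getD a ' ' ≠ row.toList.getD b ' ' then (1 : ℤ) else 0)).sum := by
  set cols := (List.range Nn).map (fun j => matrix.map (fun row => row.toList.getD j ' ')) with hcols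
  have hlen : cols.length = Nn := by simp [hcols]
  have hga : (cols.map (fun ca => cols.map
      (fun cb => ((ca.zip cb).map (fun e => if e.1 ≠ e.2 then (1 : ℤ) else 0)).sum))).getD a []
      = cols.map (fun cb => (((cols[a]'(by simpa [hlen] using ha)).zip cb).map
          (fun e => if e.1 ≠ e.2 then (1 : ℤ) else 0)).sum) := by
    rw [List.getD_eq_getElem _ _ (by simpa [hlen] using ha), List.getElem_map]
  rw [hga, List.getD_eq_getElem _ _ (by simpa [hlen] using hb), List.getElem_map]
  have hcola : cols[a]'(by simpa [hlen] using ha) = matrix.map (fun row => row.toList.getD a ' ') := by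
    simp [hcols]
  have hcolb : cols[b]'(by simpa [hlen] using hb) = matrix.map (fun row => row.toList.getD b ' ') := by
    simp [hcols]
  rw [hcola, hcolb, List.zip_map', List.map_map]
  rfl

-- ===== VERDICT (by name: the statement is the Claim_ definition above) =====
theorem reflection_spec : Claim_equal_reflection := by
  intro matrix hdom hpre
  unfold Spec_reflection
  obtain ⟨hne, hrows⟩ := hpre
  rcases matrix with _ | ⟨m, rest⟩
  · exact absurd rfl hne
  unfold reflection reflection_alt
  dsimp only
  have hget : (PySem.List.pyGet? (m :: rest) 0).getD "" = m := by simp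
  rw [hget]
  have hlenm : PySem.Str.len m = (m.toList.length : ℤ) := rfl
  set ML : ℕ := m.toList.length with hML
  rw [hlenm]
  by_cases hsmall : ML ≤ 1
  · rw [if_pos (by exact_mod_cast by omega : (ML : ℤ) < 2)]
    rw [PySem.List.pyRange_one_eq_nil (by omega)]
    rfl
  · have hML2 : 2 ≤ ML := by omega
    rw [if_neg (by omega : ¬ ((ML : ℤ) < 2))]
    have hNn : ((ML : ℤ)).toNat = ML := by omega
    rw [hNn]
    have hlen : ∀ r ∈ (m :: rest), ML ≤ r.toList.length := by
      intro r hr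
      have h2 : 2 ≤ PySem.Str.len ((m :: rest).headD "") := by
        simp only [List.headD_cons]; rw [hlenm]; omega
      have := hrows h2 r hr
      simp only [List.headD_cons] at this
      rw [hlenm] at this
      have hlr : PySem.Str.len r = (r.toList.length : ℤ) := rfl
      rw [hlr] at this
      omega
    apply PySem.List.foldl_congr_mem
    intro acc i hi
    rw [PySem.List.mem_pyRange_one] at hi
    obtain ⟨hi0, hi1⟩ := hi
    set iN : ℕ := i.toNat with hiNdef
    have hieq : i = ((iN : ℕ) : ℤ) := (Int.toNat_of_nonneg hi0).symm
    have hiML : iN + 1 < ML := by omega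
    set wN : ℕ := min (iN + 1) (ML - 1 - iN) with hwN
    have hwcast : min (i + 1) ((ML : ℤ) - 1 - i) = ((wN : ℕ) : ℤ) := by
      rw [hieq, hwN]; push_cast [Nat.cast_min]; omega
    rw [hieq] at hwcast
    rw [hieq, hwcast]
    -- A's per-axis smudge count
    have hA : ((m :: rest).map (fun row => pvCheck row.toList ((iN : ℕ) : ℤ) ((ML : ℕ) : ℤ))).sum
        = ((m :: rest).map (fun row => ((List.range wN).map
            (fun k => if row.toList.getD (iN - k) ' ' ≠ row.toList.getD (iN + 1 + k) ' '
              then (1 : ℤ) else 0)).sum)).sum := by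
      apply congrArg
      apply List.map_congr_left
      intro r hr
      exact pvCheck_eq r.toList iN ML hiML (hlen r hr)
    -- B's per-axis total via table entries
    have hrng : PySem.List.pyRange 0 ((wN : ℕ) : ℤ) 1 = (List.range wN).map (fun k => ((k : ℕ) : ℤ)) := by
      rw [PySem.List.pyRange_one]; simp
    have hB : ((PySem.List.pyRange 0 ((wN : ℕ) : ℤ) 1).map
        (fun k => ((((List.range ML).map (fun j => (m :: rest).map (fun row => row.toList.getD j ' '))).map
          (fun ca => ((List.range ML).map (fun j => (m :: rest).map (fun row => row.toList.getD j ' '))).map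
            (fun cb => ((ca.zip cb).map (fun e => if e.1 ≠ e.2 then (1 : ℤ) else 0)).sum))).getD
              ((((iN : ℕ) : ℤ) - k).toNat) []).getD ((((iN : ℕ) : ℤ) + 1 + k).toNat) 0)).sum
        = ((List.range wN).map (fun k => ((m :: rest).map (fun row =>
            if row.toList.getD (iN - k) ' ' ≠ row.toList.getD (iN + 1 + k) ' '
              then (1 : ℤ) else 0)).sum)).sum := by
      rw [hrng, List.map_map]
      apply congrArg
      apply List.map_congr_left
      intro k hk
      rw [List.mem_range] at hk
      simp only [Function.comp]
      have c1 : (((iN : ℕ) : ℤ) - ((k : ℕ) : ℤ)).toNat = iN - k := by omega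
      have c2 : (((iN : ℕ) : ℤ) + 1 + ((k : ℕ) : ℤ)).toNat = iN + 1 + k := by omega
      rw [c1, c2]
      exact pvTableEntry (m :: rest) ML (iN - k) (iN + 1 + k) (by omega) (by omega)
    rw [hA, hB, pvSumSwap]
    set S : ℤ := ((List.range wN).map (fun k => ((m :: rest).map (fun row =>
        if row.toList.getD (iN - k) ' ' ≠ row.toList.getD (iN + 1 + k) ' '
          then (1 : ℤ) else 0)).sum)).sum with hSdef
    by_cases h0 : S = 0
    · simp [h0]
    · by_cases hone : S = 1
      · simp [hone]
      · simp [h0, hone]
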